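-- pv_equiv track=rewrite | github.com/beckzman/CMDBBoard | backend/app/api/routes/dashboard_routes.py | normalize_os
-- ===== SOURCE A (Python) =====
-- def normalize_os(os_name: str) -> str:
--     """Normalize OS name to generic categories."""
--     if not os_name:
--         return ""
--
--     os_name = os_name.lower()
--
--     # Linux
--     if any(x in os_name for x in ['ubuntu', 'debian', 'centos', 'redhat', 'fedora', 'suse', 'linux', 'rhel', 'aix']):
--         return "linux"
--
--     # Windows Server
--     if any(x in os_name for x in ['windows server', 'windows 20']):
--         return "windows server"
--
--     # Windows Client
--     if any(x in os_name for x in ['windows 1', 'windows 7', 'windows 8', 'windows xp', 'windows vista']):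
--         return "windows client"
--
--     # macOS
--     if any(x in os_name for x in ['darwin', 'macos', 'osx']):
--         return "macos"
--
--     return os_name
-- ===== SOURCE B (Python) =====
-- # Flat pattern->category map + exhaustive matching + priority argmin,
-- # instead of A's short-circuiting cascade of grouped `if any(...)` blocks.
-- _PATTERN_CAT = [
--     ('ubuntu', 'linux'), ('debian', 'linux'), ('centos', 'linux'),
--     ('redhat', 'linux'), ('fedora', 'linux'), ('suse', 'linux'),
--     ('linux', 'linux'), ('rhel', 'linux'), ('aix', 'linux'),
--     ('windows server', 'windows server'), ('windows 20', 'windows server'),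
--     ('windows 1', 'windows client'), ('windows 7', 'windows client'),
--     ('windows 8', 'windows client'), ('windows xp', 'windows client'),
--     ('windows vista', 'windows client'),
--     ('darwin', 'macos'), ('macos', 'macos'), ('osx', 'macos'),
-- ]
-- _RANK = {'linux': 0, 'windows server': 1, 'windows client': 2, 'macos': 3}
--
-- def normalize_os(os_name: str) -> str:
--     """Normalize OS name to generic categories."""
--     if not os_name:
--         return ""
--     s = os_name.lower()
--     matched = [cat for pat, cat in _PATTERN_CAT if pat in s]
--     if not matched:
--         return s
--     return min(matched, key=_RANK.__getitem__)
-- ===== Notes on version B (the rewrite author's own statement) =====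
-- stated objective: alternative
-- what changed: Instead of A's short-circuiting cascade of four grouped `if any(...)` blocks, B flattens the patterns into one pattern->category list, collects ALL matching categories in a single exhaustive pass, and selects the answer as the minimum under a category priority rank (min with key).
import Mathlib
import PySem

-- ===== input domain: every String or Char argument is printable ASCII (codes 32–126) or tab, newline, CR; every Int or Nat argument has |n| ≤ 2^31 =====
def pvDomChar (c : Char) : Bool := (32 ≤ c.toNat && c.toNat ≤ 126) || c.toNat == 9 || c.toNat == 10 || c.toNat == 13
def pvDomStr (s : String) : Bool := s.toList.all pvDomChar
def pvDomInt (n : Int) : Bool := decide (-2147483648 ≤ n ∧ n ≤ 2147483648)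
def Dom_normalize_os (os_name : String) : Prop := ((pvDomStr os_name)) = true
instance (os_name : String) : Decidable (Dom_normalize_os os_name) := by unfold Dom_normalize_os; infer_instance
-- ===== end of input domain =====

-- B replaces A's short-circuiting cascade of grouped `if any(...)` blocks by a flat pattern→category
-- map matched exhaustively in one pass, selecting the result by a priority rank (objective: alternative).

-- ===== PORT A =====
def normalize_os (os_name : String) : String :=
  if os_name = "" then ""
  else
    let s := PySem.Str.lower os_name
    if (["ubuntu", "debian", "centos", "redhat", "fedora", "suse", "linux", "rhel", "aix"]).any
        (fun x => PySem.Str.isIn x s) then "linux"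
    else if (["windows server", "windows 20"]).any (fun x => PySem.Str.isIn x s) then "windows server"
    else if (["windows 1", "windows 7", "windows 8", "windows xp", "windows vista"]).any
        (fun x => PySem.Str.isIn x s) then "windows client"
    else if (["darwin", "macos", "osx"]).any (fun x => PySem.Str.isIn x s) then "macos"
    else s

-- ===== PORT B =====
def osFlat : List (String × String) :=
  [("ubuntu", "linux"), ("debian", "linux"), ("centos", "linux"),
   ("redhat", "linux"), ("fedora", "linux"), ("suse", "linux"),
   ("linux", "linux"), ("rhel", "linux"), ("aix", "linux"),
   ("windows server", "windows server"), ("windows 20", "windows server"),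
   ("windows 1", "windows client"), ("windows 7", "windows client"),
   ("windows 8", "windows client"), ("windows xp", "windows client"),
   ("windows vista", "windows client"),
   ("darwin", "macos"), ("macos", "macos"), ("osx", "macos")]

-- _RANK.__getitem__ on the four category strings
def osRank (c : String) : Int :=
  if c = "linux" then 0
  else if c = "windows server" then 1
  else if c = "windows client" then 2
  else 3

-- the list comprehension `[cat for pat, cat in _PATTERN_CAT if pat in s]`
def matchedCats (s : String) : List String :=
  osFlat.filterMap (fun pc => if PySem.Str.isIn pc.1 s then some pc.2 else none)

def normalize_os_alt (os_name : String) : String :=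
  if os_name = "" then ""
  else
    let s := PySem.Str.lower os_name
    match PySem.List.min? (matchedCats s) osRank with
    | none => s
    | some c => c

-- ===== PRECONDITION & SPEC =====
def Spec_normalize_os (os_name : String) (out : String) : Prop := out = normalize_os_alt os_name
instance (os_name : String) (out : String) : Decidable (Spec_normalize_os os_name out) := by unfold Spec_normalize_os; infer_instance

-- ===== CLAIM (what is proved, stated in full; the proofs are below) =====
def Claim_equal_normalize_os : Prop := ∀ (os_name : String), Dom_normalize_os os_name → Spec_normalize_os os_name (normalize_os os_name)

-- ===== LEMMAS AND PROOFS =====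

theorem mem_matchedCats_linux (s : String) :
    "linux" ∈ matchedCats s ↔
      (["ubuntu", "debian", "centos", "redhat", "fedora", "suse", "linux", "rhel", "aix"]).any
        (fun x => PySem.Str.isIn x s) = true := by
  simp [matchedCats, osFlat, List.mem_filterMap]

theorem mem_matchedCats_ws (s : String) :
    "windows server" ∈ matchedCats s ↔
      (["windows server", "windows 20"]).any (fun x => PySem.Str.isIn x s) = true := by
  simp [matchedCats, osFlat, List.mem_filterMap]

theorem mem_matchedCats_wc (s : String) :
    "windows client" ∈ matchedCats s ↔
      (["windows 1", "windows 7", "windows 8", "windows xp", "windows vista"]).any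
        (fun x => PySem.Str.isIn x s) = true := by
  simp [matchedCats, osFlat, List.mem_filterMap]

theorem mem_matchedCats_macos (s : String) :
    "macos" ∈ matchedCats s ↔
      (["darwin", "macos", "osx"]).any (fun x => PySem.Str.isIn x s) = true := by
  simp [matchedCats, osFlat, List.mem_filterMap]

theorem mem_matchedCats_cases (s c : String) (h : c ∈ matchedCats s) :
    c = "linux" ∨ c = "windows server" ∨ c = "windows client" ∨ c = "macos" := by
  simp [matchedCats, osFlat, List.mem_filterMap] at h
  rcases h with ⟨-, rfl⟩ | ⟨-, rfl⟩ | ⟨-, rfl⟩ | ⟨-, rfl⟩ | ⟨-, rfl⟩ | ⟨-, rfl⟩ | ⟨-, rfl⟩ |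
    ⟨-, rfl⟩ | ⟨-, rfl⟩ | ⟨-, rfl⟩ | ⟨-, rfl⟩ | ⟨-, rfl⟩ | ⟨-, rfl⟩ | ⟨-, rfl⟩ | ⟨-, rfl⟩ |
    ⟨-, rfl⟩ | ⟨-, rfl⟩ | ⟨-, rfl⟩ | ⟨-, rfl⟩ <;> simp

theorem matchedCats_nil_iff (s : String) :
    matchedCats s = [] ↔
      ¬ "linux" ∈ matchedCats s ∧ ¬ "windows server" ∈ matchedCats s ∧
      ¬ "windows client" ∈ matchedCats s ∧ ¬ "macos" ∈ matchedCats s := by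
  constructor
  · intro h; simp [h]
  · intro ⟨h1, h2, h3, h4⟩
    rcases he : matchedCats s with _ | ⟨c, t⟩
    · rfl
    · exfalso
      have hc : c ∈ matchedCats s := by rw [he]; exact List.mem_cons_self
      rcases mem_matchedCats_cases s c hc with rfl | rfl | rfl | rfl
      · exact h1 hc
      · exact h2 hc
      · exact h3 hc
      · exact h4 hc

-- ===== VERDICT (by name: the statement is the Claim_ definition above) =====
theorem normalize_os_spec : Claim_equal_normalize_os := by
  intro os_name _
  unfold Spec_normalize_os normalize_os normalize_os_alt
  by_cases hempty : os_name = ""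
  · simp [hempty]
  · simp only [if_neg hempty]
    set s := PySem.Str.lower os_name with hs
    rcases hmin : PySem.List.min? (matchedCats s) osRank with _ | c
    · -- no pattern matched: both sides fall through to s
      have hnil := (PySem.List.min?_eq_none_iff (matchedCats s) osRank).mp hmin
      rw [matchedCats_nil_iff] at hnil
      obtain ⟨h1, h2, h3, h4⟩ := hnil
      rw [mem_matchedCats_linux] at h1
      rw [mem_matchedCats_ws] at h2
      rw [mem_matchedCats_wc] at h3
      rw [mem_matchedCats_macos] at h4
      simp only [Bool.not_eq_true] at h1 h2 h3 h4
      simp_all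
    · have hc := PySem.List.min?_mem hmin
      have hle := PySem.List.min?_isMin hmin
      by_cases h1 : (["ubuntu", "debian", "centos", "redhat", "fedora", "suse", "linux", "rhel", "aix"]).any
          (fun x => PySem.Str.isIn x s) = true
      · -- A = "linux"; "linux" is in matched, so the min-rank element is "linux"
        have hl : "linux" ∈ matchedCats s := (mem_matchedCats_linux s).mpr h1
        have := hle _ hl
        rcases mem_matchedCats_cases s c hc with rfl | rfl | rfl | rfl <;>
          simp_all [osRank]
      · by_cases h2 : (["windows server", "windows 20"]).any (fun x => PySem.Str.isIn x s) = true
        · have hl : "windows server" ∈ matchedCats s := (mem_matchedCats_ws s).mpr h2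
          have := hle _ hl
          have hcl : c ≠ "linux" := by
            intro hcc; exact h1 ((mem_matchedCats_linux s).mp (hcc ▸ hc))
          rcases mem_matchedCats_cases s c hc with rfl | rfl | rfl | rfl <;>
            simp_all [osRank]
        · by_cases h3 : (["windows 1", "windows 7", "windows 8", "windows xp", "windows vista"]).any
              (fun x => PySem.Str.isIn x s) = true
          · have hl : "windows client" ∈ matchedCats s := (mem_matchedCats_wc s).mpr h3
            have := hle _ hl
            have hcl : c ≠ "linux" := by
              intro hcc; exact h1 ((mem_matchedCats_linux s).mp (hcc ▸ hc))
            have hcw : c ≠ "windows server" := by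
              intro hcc; exact h2 ((mem_matchedCats_ws s).mp (hcc ▸ hc))
            rcases mem_matchedCats_cases s c hc with rfl | rfl | rfl | rfl <;>
              simp_all [osRank]
          · by_cases h4 : (["darwin", "macos", "osx"]).any (fun x => PySem.Str.isIn x s) = true
            · have hcl : c ≠ "linux" := by
                intro hcc; exact h1 ((mem_matchedCats_linux s).mp (hcc ▸ hc))
              have hcw : c ≠ "windows server" := by
                intro hcc; exact h2 ((mem_matchedCats_ws s).mp (hcc ▸ hc))
              have hcc3 : c ≠ "windows client" := by
                intro hcc; exact h3 ((mem_matchedCats_wc s).mp (hcc ▸ hc))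
              rcases mem_matchedCats_cases s c hc with rfl | rfl | rfl | rfl <;>
                simp_all
            · -- all four groups false, yet min? = some c: impossible
              exfalso
              rcases mem_matchedCats_cases s c hc with rfl | rfl | rfl | rfl
              · exact h1 ((mem_matchedCats_linux s).mp hc)
              · exact h2 ((mem_matchedCats_ws s).mp hc)
              · exact h3 ((mem_matchedCats_wc s).mp hc)
              · exact h4 ((mem_matchedCats_macos s).mp hc)
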